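-- pv_equiv track=rewrite | github.com/eljonsh7/tv-programs-scheduler | rilp.py | check_genre
-- ===== SOURCE A (Python) =====
-- def check_genre(schedule, programs, R):
--     """Check genre violations"""
--     violations = []
--     run = 1
--     last_g = None
--     for idx, i in enumerate(schedule):
--         g = programs[i]['genre']
--         if g == last_g:
--             run += 1
--             if run > R:
--                 violations.append(idx)
--         else:
--             run = 1
--         last_g = g
--     return violations
-- ===== SOURCE B (Python) =====
-- def check_genre(schedule, programs, R):
--     """Check genre violations (run-segmentation rewrite)"""
--     violations = []
--     start = max(R, 1)
--     n = len(schedule)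
--     j = 0
--     while j < n:
--         g = programs[schedule[j]]['genre']
--         k = j + 1
--         while k < n and programs[schedule[k]]['genre'] == g:
--             k += 1
--         violations.extend(range(j + start, k))
--         j = k
--     return violations
-- ===== Notes on version B (the rewrite author's own statement) =====
-- stated objective: alternative
-- what changed: B segments the schedule into maximal consecutive same-genre runs and emits each run's violating indices as an arithmetic range(j + max(R,1), k), replacing A's element-by-element run counter and last-genre state.
import Mathlib
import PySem

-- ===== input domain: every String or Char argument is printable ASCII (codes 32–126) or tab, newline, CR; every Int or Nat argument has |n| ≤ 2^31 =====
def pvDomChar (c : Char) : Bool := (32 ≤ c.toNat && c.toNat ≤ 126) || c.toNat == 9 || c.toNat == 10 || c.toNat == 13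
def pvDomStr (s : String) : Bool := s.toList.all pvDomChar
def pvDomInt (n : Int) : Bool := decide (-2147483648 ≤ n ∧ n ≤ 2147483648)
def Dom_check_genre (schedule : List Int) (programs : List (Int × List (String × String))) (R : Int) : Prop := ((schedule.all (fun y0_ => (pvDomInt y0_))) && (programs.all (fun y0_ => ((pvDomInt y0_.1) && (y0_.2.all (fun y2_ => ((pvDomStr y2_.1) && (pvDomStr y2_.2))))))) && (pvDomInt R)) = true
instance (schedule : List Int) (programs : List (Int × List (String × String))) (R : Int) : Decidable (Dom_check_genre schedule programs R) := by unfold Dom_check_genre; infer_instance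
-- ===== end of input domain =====

-- ===== PORT A =====
-- B changes the traversal: maximal same-genre runs are segmented and violation
-- indices emitted as arithmetic ranges, instead of A's per-element run counter
-- (objective: alternative decomposition; same asymptotic cost).

-- programs[i]['genre'] : assoc-list lookup (first match), none = KeyError
def genreOf (programs : List (Int × List (String × String))) (i : Int) : Option String :=
  (List.lookup i programs).bind (fun attrs => List.lookup "genre" attrs)

-- A's loop: state (idx, run, last_g); flags idx when g == last_g and run+1 > R
def goA (P : List (Int × List (String × String))) (R : Int) :
    List Int → Int → Int → Option String → List Int
  | [], _, _, _ => []
  | i :: rest, idx, run, last =>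
    let g := genreOf P i
    if g = last then
      (if run + 1 > R then [idx] else []) ++ goA P R rest (idx + 1) (run + 1) g
    else
      goA P R rest (idx + 1) 1 g

def check_genre (schedule : List Int) (programs : List (Int × List (String × String))) (R : Int) : List Int :=
  goA programs R schedule 0 1 none

-- ===== PORT B =====
-- length of the maximal prefix whose genre equals g (Source B's inner while loop)
def runLen (P : List (Int × List (String × String))) (g : Option String) : List Int → Nat
  | [] => 0
  | i :: rest => if genreOf P i = g then runLen P g rest + 1 else 0

-- Source B's outer while loop: segment a run, emit range(j + max(R,1), k), continue at k
def goB (P : List (Int × List (String × String))) (R : Int) (sch : List Int) (idx : Int) : List Int :=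
  match sch with
  | [] => []
  | i :: rest =>
    let m := runLen P (genreOf P i) rest
    PySem.List.pyRange (idx + max R 1) (idx + 1 + (m : Int)) 1 ++ goB P R (rest.drop m) (idx + 1 + (m : Int))
termination_by sch.length
decreasing_by simp [List.length_drop]

def check_genre_alt (schedule : List Int) (programs : List (Int × List (String × String))) (R : Int) : List Int :=
  goB programs R schedule 0

-- ===== PRECONDITION & SPEC =====
-- Pre_ excludes exactly the inputs where Python A raises (KeyError/TypeError):
-- some scheduled id is missing from programs, or its dict has no 'genre' key.
def Pre_check_genre (schedule : List Int) (programs : List (Int × List (String × String))) (R : Int) : Prop :=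
  ∀ i ∈ schedule, (genreOf programs i).isSome
instance (schedule : List Int) (programs : List (Int × List (String × String))) (R : Int) : Decidable (Pre_check_genre schedule programs R) := by unfold Pre_check_genre; infer_instance

def pvWitness_check_genre : List Int × (List (Int × List (String × String))) × Int :=
  ([0, 0, 0, 1], [(0, [("genre", "a")]), (1, [("genre", "b")])], 1)

def Spec_check_genre (schedule : List Int) (programs : List (Int × List (String × String))) (R : Int) (out : List Int) : Prop := out = check_genre_alt schedule programs R
instance (schedule : List Int) (programs : List (Int × List (String × String))) (R : Int) (out : List Int) : Decidable (Spec_check_genre schedule programs R out) := by unfold Spec_check_genre; infer_instance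

-- ===== CLAIM (what is proved, stated in full; the proofs are below) =====
def Claim_equal_check_genre : Prop := ∀ (schedule : List Int) (programs : List (Int × List (String × String))) (R : Int), Dom_check_genre schedule programs R → Pre_check_genre schedule programs R → Spec_check_genre schedule programs R (check_genre schedule programs R)

-- ===== LEMMAS AND PROOFS =====

theorem goB_nil (P : List (Int × List (String × String))) (R idx : Int) :
    goB P R [] idx = [] := by rw [goB]

theorem goB_cons (P : List (Int × List (String × String))) (R : Int) (i : Int) (rest : List Int) (idx : Int) :
    goB P R (i :: rest) idx =
      PySem.List.pyRange (idx + max R 1) (idx + 1 + (runLen P (genreOf P i) rest : Int)) 1 ++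
        goB P R (rest.drop (runLen P (genreOf P i) rest)) (idx + 1 + (runLen P (genreOf P i) rest : Int)) := by
  rw [goB]

-- A's loop, started with counter `run` and previous genre `g`, flags exactly the
-- index range [idx + max (R-run) 0, idx + runLen g sch) and then hands over to B's
-- run-segmentation on the remainder of the list.
theorem goA_eq (P : List (Int × List (String × String))) (R : Int) :
    ∀ (sch : List Int) (idx run : Int) (g : Option String),
      goA P R sch idx run g =
        PySem.List.pyRange (idx + max (R - run) 0) (idx + (runLen P g sch : Int)) 1 ++
          goB P R (sch.drop (runLen P g sch)) (idx + (runLen P g sch : Int)) := by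
  intro sch
  induction sch with
  | nil =>
    intro idx run g
    simp only [goA, runLen, Nat.cast_zero, add_zero, List.drop_nil, goB_nil, List.append_nil]
    exact (PySem.List.pyRange_one_eq_nil (by omega)).symm
  | cons i rest ih =>
    intro idx run g
    by_cases hg : genreOf P i = g
    · have hr : runLen P g (i :: rest) = runLen P g rest + 1 := by
        simp [runLen, hg]
      rw [show goA P R (i :: rest) idx run g =
            (if run + 1 > R then [idx] else []) ++ goA P R rest (idx + 1) (run + 1) (genreOf P i)
          from by simp [goA, hg]]
      rw [hg, ih, hr]
      have hdrop : (i :: rest).drop (runLen P g rest + 1) = rest.drop (runLen P g rest) := by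
        simp
      rw [hdrop]
      have harg : idx + 1 + (runLen P g rest : Int) = idx + ((runLen P g rest : Int) + 1) := by omega
      rw [harg]
      push_cast
      by_cases hR : run + 1 > R
      · have h1 : idx + max (R - run) 0 = idx := by omega
        have h2 : idx + 1 + max (R - (run + 1)) 0 = idx + 1 := by omega
        simp only [hR, if_true, h1, h2]
        rw [show PySem.List.pyRange idx (idx + ((runLen P g rest : Int) + 1)) 1 =
              idx :: PySem.List.pyRange (idx + 1) (idx + ((runLen P g rest : Int) + 1)) 1
            from PySem.List.pyRange_one_cons (by omega)]
        simp
      · have h2 : idx + 1 + max (R - (run + 1)) 0 = idx + max (R - run) 0 := by omega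
        simp only [hR, if_false, List.nil_append, h2]
    · have hr : runLen P g (i :: rest) = 0 := by simp [runLen, hg]
      rw [show goA P R (i :: rest) idx run g = goA P R rest (idx + 1) 1 (genreOf P i)
          from by simp [goA, hg]]
      rw [ih, hr]
      simp only [Nat.cast_zero, add_zero, List.drop_zero]
      rw [PySem.List.pyRange_one_eq_nil (by omega : idx ≤ idx + max (R - run) 0), List.nil_append]
      rw [goB_cons]
      have h3 : idx + 1 + max (R - 1) 0 = idx + max R 1 := by omega
      rw [h3]

theorem runLen_none (P : List (Int × List (String × String))) (sch : List Int)
    (h : ∀ i ∈ sch, (genreOf P i).isSome) : runLen P none sch = 0 := by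
  cases sch with
  | nil => rfl
  | cons i rest =>
    have := h i (by simp)
    simp only [runLen]
    rw [if_neg]
    intro hc
    rw [hc] at this
    simp at this

-- ===== VERDICT (by name: the statement is the Claim_ definition above) =====
theorem check_genre_spec : Claim_equal_check_genre := by
  intro schedule programs R _ hpre
  unfold Spec_check_genre check_genre check_genre_alt
  rw [goA_eq, runLen_none programs schedule hpre]
  simp only [Nat.cast_zero, add_zero, List.drop_zero, zero_add]
  rw [PySem.List.pyRange_one_eq_nil (by omega : (0 : Int) ≤ max (R - 1) 0), List.nil_append]
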